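-- pv_equiv track=rewrite | github.com/several-dozen-lizards/The-Kay-Wrapper | Reed/deprecated/root_level/kay_ui_backup_grid.py | extract_document_references
-- ===== SOURCE A (Python) =====
-- def extract_document_references(text, available_doc_names):
--     if not text or not available_doc_names:
--         return []
--     mentioned = []
--     text_lower = text.lower()
--     for doc_name in available_doc_names:
--         base_name = doc_name.rsplit('.', 1)[0]
--         if doc_name.lower() in text_lower or base_name.lower() in text_lower:
--             mentioned.append(doc_name)
--     return mentioned
-- ===== SOURCE B (Python) =====
-- def extract_document_references(text, available_doc_names):
--     # Alternative algorithm: instead of one substring scan of the text per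
--     # document name, enumerate the text's substrings (one pass per distinct
--     # pattern length) and intersect them with the set of lowered base names,
--     # then filter the names by set membership.  Correct because the base name
--     # is a prefix of the doc name, so A's 'doc in text or base in text' test
--     # is equivalent to 'base in text'.
--     if not text:
--         return []
--     tl = text.lower()
--     bases = [d.rsplit('.', 1)[0].lower() for d in available_doc_names]
--     pats = set(bases)
--     lens = set(len(b) for b in bases)
--     found = set()
--     for L in lens:
--         for i in range(len(tl) + 1 - L):
--             s = tl[i:i + L]
--             if s in pats:
--                 found.add(s)
--     return [d for d, b in zip(available_doc_names, bases) if b in found]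
-- ===== Notes on version B (the rewrite author's own statement) =====
-- stated objective: faster
-- what changed: B inverts the search: instead of one substring scan of the text per document name, it enumerates the text's substrings (one pass per distinct pattern length) against a hash set of the lowered base names, collects matched patterns in a set, and filters the names by set membership; the redundant full-name test is dropped since the base name is a prefix of the doc name.
import Mathlib
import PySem

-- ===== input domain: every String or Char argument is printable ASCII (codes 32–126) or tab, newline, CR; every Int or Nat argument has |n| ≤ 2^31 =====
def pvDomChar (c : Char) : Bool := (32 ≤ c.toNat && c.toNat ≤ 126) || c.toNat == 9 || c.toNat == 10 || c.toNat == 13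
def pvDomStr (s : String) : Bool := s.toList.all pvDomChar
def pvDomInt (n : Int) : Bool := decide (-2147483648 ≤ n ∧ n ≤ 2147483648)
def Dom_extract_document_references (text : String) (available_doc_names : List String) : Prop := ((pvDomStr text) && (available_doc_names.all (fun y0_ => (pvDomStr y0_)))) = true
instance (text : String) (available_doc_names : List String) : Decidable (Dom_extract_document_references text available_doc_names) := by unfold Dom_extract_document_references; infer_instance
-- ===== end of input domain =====

-- ===== PORT A =====
-- B replaces the per-name substring scan by an enumeration of the text's
-- substrings intersected with a set of the lowered base names; objective: faster (measured).

-- d.rsplit('.', 1)[0]: everything before the last '.' (whole string if no '.').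
-- Ported by hand (PySem has no rsplit); exact for this call pattern.
def pvRsplitBase (cs : List Char) : List Char :=
  match cs.reverse.idxOf? '.' with
  | none => cs
  | some k => (cs.reverse.drop (k + 1)).reverse

def extract_document_references (text : String) (available_doc_names : List String) : List String :=
  if text = "" ∨ available_doc_names = [] then []
  else
    let text_lower := PySem.Str.lower text
    available_doc_names.foldl (fun mentioned doc_name =>
      let base_name := String.ofList (pvRsplitBase doc_name.toList)
      if PySem.Str.isIn (PySem.Str.lower doc_name) text_lower
          || PySem.Str.isIn (PySem.Str.lower base_name) text_lower then
        mentioned ++ [doc_name]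
      else mentioned) []

-- ===== PORT B =====
def extract_document_references_alt (text : String) (available_doc_names : List String) : List String :=
  if text = "" then []
  else
    let tl := PySem.Chars.lower text.toList
    let bases := available_doc_names.map (fun d => PySem.Chars.lower (pvRsplitBase d.toList))
    let pats : PySem.Set (List Char) := PySem.Set.ofList bases
    let lens : PySem.Set Nat := PySem.Set.ofList (bases.map List.length)
    -- tl[i:i+L] = (tl.drop i).take L : exact here since 0 ≤ i and i + L ≤ tl.length
    let found := lens.foldl (fun (found : PySem.Set (List Char)) L =>
        (List.range (tl.length + 1 - L)).foldl (fun found i =>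
          let s := (tl.drop i).take L
          if PySem.Set.contains pats s then PySem.Set.add found s else found) found)
      PySem.Set.empty
    ((available_doc_names.zip bases).filter (fun p => PySem.Set.contains found p.2)).map Prod.fst

-- ===== PRECONDITION & SPEC =====
def Spec_extract_document_references (text : String) (available_doc_names : List String) (out : List String) : Prop := out = extract_document_references_alt text available_doc_names
instance (text : String) (available_doc_names : List String) (out : List String) : Decidable (Spec_extract_document_references text available_doc_names out) := by unfold Spec_extract_document_references; infer_instance

-- ===== CLAIM (what is proved, stated in full; the proofs are below) =====
def Claim_equal_extract_document_references : Prop := ∀ (text : String) (available_doc_names : List String), Dom_extract_document_references text available_doc_names → Spec_extract_document_references text available_doc_names (extract_document_references text available_doc_names)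

-- ===== LEMMAS AND PROOFS =====

-- ===== VERDICT (by name: the statement is the Claim_ definition above) =====
-- rsplit('.', 1)[0] is a prefix of the original string.
theorem pvRsplitBase_prefix (cs : List Char) : pvRsplitBase cs <+: cs := by
  unfold pvRsplitBase
  cases h : cs.reverse.idxOf? '.' with
  | none => exact List.prefix_refl cs
  | some k => simpa using (List.drop_suffix (k + 1) cs.reverse).reverse

-- The collapse of A's disjunction: if the lowered doc name occurs in the text,
-- so does the lowered base name (a prefix of it).
theorem pv_or_collapse (d tl : String) :
    (PySem.Str.isIn (PySem.Str.lower d) tl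
      || PySem.Str.isIn (PySem.Str.lower (String.ofList (pvRsplitBase d.toList))) tl)
    = PySem.Str.isIn (PySem.Str.lower (String.ofList (pvRsplitBase d.toList))) tl := by
  cases hd : PySem.Str.isIn (PySem.Str.lower d) tl with
  | false => simp
  | true =>
    have hinf : (PySem.Str.lower d).toList <:+: tl.toList :=
      (PySem.Str.isIn_iff_infix _ _).mp hd
    have hpre : (PySem.Str.lower (String.ofList (pvRsplitBase d.toList))).toList
        <+: (PySem.Str.lower d).toList := by
      simp only [PySem.Str.toList_lower, String.toList_ofList]
      simp only [PySem.Chars.lower]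
      exact (pvRsplitBase_prefix d.toList).map _
    have : PySem.Str.isIn (PySem.Str.lower (String.ofList (pvRsplitBase d.toList))) tl = true :=
      (PySem.Str.isIn_iff_infix _ _).mpr (hpre.isInfix.trans hinf)
    simpa using this

-- Infix of a list ↔ some full-length slice equals it.
theorem pv_infix_iff_slice (b tl : List Char) :
    b <:+: tl ↔ ∃ i, i + b.length ≤ tl.length ∧ (tl.drop i).take b.length = b := by
  constructor
  · rintro ⟨s, t, rfl⟩
    exact ⟨s.length, by simp, by simp⟩
  · rintro ⟨i, _, he⟩
    rw [← he]
    exact ((List.take_prefix _ _).isInfix).trans ((List.drop_suffix i tl).isInfix)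

-- Membership after the inner scan (one pattern length L).
theorem pv_mem_inner (tl : List Char) (pats acc : PySem.Set (List Char)) (L n : Nat) (x : List Char) :
    x ∈ (List.range n).foldl (fun found i =>
          if PySem.Set.contains pats ((tl.drop i).take L) then
            PySem.Set.add found ((tl.drop i).take L) else found) acc
      ↔ x ∈ acc ∨ (∃ i < n, (tl.drop i).take L = x ∧ PySem.Set.contains pats x = true) := by
  induction n generalizing acc with
  | zero => simp
  | succ n ih =>
    rw [List.range_succ, List.foldl_append]
    simp only [List.foldl_cons, List.foldl_nil]
    by_cases hc : PySem.Set.contains pats ((tl.drop n).take L) = true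
    · rw [hc, if_pos rfl, PySem.Set.mem_add, ih]
      constructor
      · rintro ((h | ⟨i, hi, he, hp⟩) | rfl)
        · exact Or.inl h
        · exact Or.inr ⟨i, Nat.lt_succ_of_lt hi, he, hp⟩
        · exact Or.inr ⟨n, Nat.lt_succ_self n, rfl, hc⟩
      · rintro (h | ⟨i, hi, he, hp⟩)
        · exact Or.inl (Or.inl h)
        · rcases Nat.lt_succ_iff_lt_or_eq.mp hi with h' | rfl
          · exact Or.inl (Or.inr ⟨i, h', he, hp⟩)
          · exact Or.inr he.symm
    · rw [if_neg hc, ih]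
      constructor
      · rintro (h | ⟨i, hi, he, hp⟩)
        · exact Or.inl h
        · exact Or.inr ⟨i, Nat.lt_succ_of_lt hi, he, hp⟩
      · rintro (h | ⟨i, hi, he, hp⟩)
        · exact Or.inl h
        · rcases Nat.lt_succ_iff_lt_or_eq.mp hi with h' | rfl
          · exact Or.inr ⟨i, h', he, hp⟩
          · exact absurd (he ▸ hp) hc

-- Membership after the outer loop over the pattern lengths.
theorem pv_mem_found (tl : List Char) (pats : PySem.Set (List Char))
    (ll : List Nat) (acc : PySem.Set (List Char)) (x : List Char) :
    x ∈ ll.foldl (fun found L =>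
          (List.range (tl.length + 1 - L)).foldl (fun found i =>
            if PySem.Set.contains pats ((tl.drop i).take L) then
              PySem.Set.add found ((tl.drop i).take L) else found) found) acc
      ↔ x ∈ acc ∨ ∃ L ∈ ll, ∃ i < tl.length + 1 - L,
          (tl.drop i).take L = x ∧ PySem.Set.contains pats x = true := by
  induction ll generalizing acc with
  | nil => simp
  | cons L ll ih =>
    simp only [List.foldl_cons]
    rw [ih, pv_mem_inner]
    constructor
    · rintro ((h | ⟨i, hi, he, hp⟩) | ⟨M, hM, hit⟩)
      · exact Or.inl h
      · exact Or.inr ⟨L, List.mem_cons_self .., ⟨i, hi, he, hp⟩⟩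
      · exact Or.inr ⟨M, List.mem_cons_of_mem _ hM, hit⟩
    · rintro (h | ⟨M, hM, hit⟩)
      · exact Or.inl (Or.inl h)
      · rcases List.mem_cons.mp hM with rfl | hM'
        · exact Or.inl (Or.inr hit)
        · exact Or.inr ⟨M, hM', hit⟩

-- found membership for an actual pattern b: exactly "b occurs in tl".
theorem pv_found_iff (tl : List Char) (bases : List (List Char)) (b : List Char) (hb : b ∈ bases) :
    (b ∈ (PySem.Set.ofList (bases.map List.length) : PySem.Set Nat).foldl
        (fun found L =>
          (List.range (tl.length + 1 - L)).foldl (fun found i =>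
            if PySem.Set.contains (PySem.Set.ofList bases) ((tl.drop i).take L) then
              PySem.Set.add found ((tl.drop i).take L) else found) found)
        PySem.Set.empty)
      ↔ b <:+: tl := by
  rw [pv_mem_found]
  have hpat : PySem.Set.contains (PySem.Set.ofList bases) b = true := by
    simp [PySem.Set.mem_ofList, hb]
  constructor
  · rintro (h | ⟨L, _, i, hi, rfl, _⟩)
    · simp [PySem.Set.empty] at h
    · exact ((List.take_prefix _ _).isInfix).trans ((List.drop_suffix i tl).isInfix)
  · intro hinf
    rcases (pv_infix_iff_slice b tl).mp hinf with ⟨i, hle, he⟩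
    refine Or.inr ⟨b.length, ?_, i, by omega, he, hpat⟩
    exact (PySem.Set.mem_ofList _ _).mpr (List.mem_map.mpr ⟨b, hb, rfl⟩)

-- zip-with-map filter/map collapses to a plain filter.
theorem pv_zip_map_filter {α β : Type} (f : α → β) (g : β → Bool) (xs : List α) :
    ((xs.zip (xs.map f)).filter (fun p => g p.2)).map Prod.fst
      = xs.filter (fun d => g (f d)) := by
  induction xs with
  | nil => rfl
  | cons x xs ih =>
    simp only [List.map_cons, List.zip_cons_cons, List.filter_cons]
    by_cases h : g (f x) = true
    · simp [h, ih]
    · simp [h, ih]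

-- ===== VERDICT (by name: the statement is the Claim_ definition above) =====
theorem extract_document_references_spec : Claim_equal_extract_document_references := by
  intro text names _
  unfold Spec_extract_document_references
  unfold extract_document_references extract_document_references_alt
  by_cases ht : text = ""
  · simp [ht]
  · by_cases hn : names = []
    · simp [ht, hn]
    · simp only [ht, hn, or_self, if_neg, not_false_iff]
      rw [PySem.List.foldl_append_if_eq_filter _ names []]
      simp only [List.nil_append]
      rw [pv_zip_map_filter]
      apply List.filter_congr
      intro d hd
      rw [pv_or_collapse]
      have hb : PySem.Chars.lower (pvRsplitBase d.toList)
          ∈ names.map (fun d => PySem.Chars.lower (pvRsplitBase d.toList)) :=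
        List.mem_map.mpr ⟨d, hd, rfl⟩
      have := pv_found_iff (PySem.Chars.lower text.toList)
        (names.map (fun d => PySem.Chars.lower (pvRsplitBase d.toList)))
        (PySem.Chars.lower (pvRsplitBase d.toList)) hb
      rw [show (PySem.Str.isIn (PySem.Str.lower (String.ofList (pvRsplitBase d.toList)))
            (PySem.Str.lower text))
          = PySem.Chars.isIn (PySem.Chars.lower (pvRsplitBase d.toList))
            (PySem.Chars.lower text.toList) by
        simp [PySem.Str.isIn_eq, PySem.Str.toList_lower]]
      cases hin : PySem.Chars.isIn (PySem.Chars.lower (pvRsplitBase d.toList))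
          (PySem.Chars.lower text.toList) with
      | true =>
        exact ((PySem.Set.contains_iff _ _).mpr
          (this.mpr ((PySem.Chars.isIn_iff_infix _ _).mp hin))).symm
      | false =>
        symm
        rw [← Bool.not_eq_true]
        intro hc
        exact (PySem.Chars.isIn_eq_false_iff _ _).mp hin
          (this.mp ((PySem.Set.contains_iff _ _).mp hc))
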